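-- pv_equiv track=rewrite | github.com/beaconapollo/alx-higher_level_programming | 0x03-python-data_structures/8-multiple_returns.py | multiple_returns
-- ===== SOURCE A (Python) =====
-- def multiple_returns(sentence):
--     len = 0
--     first = ''
--     for c in sentence:
--         if len == 0:
--             first = c
--         len += 1
--     return len, first
-- ===== SOURCE B (Python) =====
-- def multiple_returns(sentence):
--     return len(sentence), (sentence[0] if sentence else '')
-- ===== Notes on version B (the rewrite author's own statement) =====
-- stated objective: idiomatic
-- what changed: Replaces the single-pass counting/first-capture loop with a direct tuple of len(sentence) and sentence[0] guarded for the empty string.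
import Mathlib
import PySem

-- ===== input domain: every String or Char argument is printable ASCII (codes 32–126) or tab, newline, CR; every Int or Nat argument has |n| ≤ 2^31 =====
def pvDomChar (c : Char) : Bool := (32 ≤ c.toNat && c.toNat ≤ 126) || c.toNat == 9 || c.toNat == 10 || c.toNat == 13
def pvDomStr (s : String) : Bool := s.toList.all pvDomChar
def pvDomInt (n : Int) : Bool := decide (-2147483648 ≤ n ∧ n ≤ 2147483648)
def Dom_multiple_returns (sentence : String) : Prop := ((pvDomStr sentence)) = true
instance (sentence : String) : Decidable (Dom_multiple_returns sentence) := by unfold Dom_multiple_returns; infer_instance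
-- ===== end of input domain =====

-- B replaces A's counting/first-capture loop with direct len() and guarded sentence[0] access (idiomatic; same values).

-- ===== PORT A =====
-- loop: for c in sentence: if len == 0: first = c; len += 1
def multiple_returns (sentence : String) : Int × String :=
  sentence.toList.foldl
    (fun (st : Int × String) c =>
      (st.1 + 1, if st.1 = 0 then String.ofList [c] else st.2))
    (0, "")

-- ===== PORT B =====
def multiple_returns_alt (sentence : String) : Int × String :=
  ((sentence.toList.length : Int),
   match sentence.toList with
   | [] => ""
   | c :: _ => String.ofList [c])

-- ===== PRECONDITION & SPEC =====
def Spec_multiple_returns (sentence : String) (out : Int × String) : Prop := out = multiple_returns_alt sentence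
instance (sentence : String) (out : Int × String) : Decidable (Spec_multiple_returns sentence out) := by unfold Spec_multiple_returns; infer_instance

-- ===== CLAIM (what is proved, stated in full; the proofs are below) =====
def Claim_equal_multiple_returns : Prop := ∀ (sentence : String), Dom_multiple_returns sentence → Spec_multiple_returns sentence (multiple_returns sentence)

-- ===== LEMMAS AND PROOFS =====
-- Loop invariant: starting from count n > 0 and first f, the fold counts on and keeps f.
theorem mr_fold_pos (l : List Char) (n : Int) (f : String) (hn : n ≠ 0) (hnn : 0 ≤ n) :
    l.foldl (fun (st : Int × String) c => (st.1 + 1, if st.1 = 0 then String.ofList [c] else st.2)) (n, f)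
      = (n + l.length, f) := by
  induction l generalizing n with
  | nil => simp
  | cons c t ih =>
    simp only [List.foldl_cons, if_neg hn]
    rw [ih (n + 1) (by omega) (by omega)]
    simp [List.length_cons]
    ring

theorem multiple_returns_eq (sentence : String) :
    multiple_returns sentence = multiple_returns_alt sentence := by
  unfold multiple_returns multiple_returns_alt
  cases h : sentence.toList with
  | nil => simp
  | cons c t =>
    have h1 := mr_fold_pos t 1 (String.ofList [c]) one_ne_zero (by norm_num)
    simp only [List.foldl_cons, reduceIte, zero_add]
    rw [h1]
    simp only [List.length_cons, Prod.mk.injEq]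
    refine ⟨by push_cast; ring, trivial⟩

-- ===== VERDICT (by name: the statement is the Claim_ definition above) =====
theorem multiple_returns_spec : Claim_equal_multiple_returns := by
  intro s _
  exact multiple_returns_eq s
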